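-- pv_equiv track=rewrite | github.com/pitikdmitry/leetcode | MOST_FREQUENT_TASKS/longest_string_chain.py | is_descessor
-- ===== SOURCE A (Python) =====
-- def is_descessor(word1, word2):
--     counter = {}
--     for c in word2:
--         if c in counter:
--             counter[c] += 1
--         else:
--             counter[c] = 1
--
--     for c in word1:
--         if c in counter:
--             counter[c] -= 1
--             if counter[c] == 0:
--                 del counter[c]
--         else:
--             return False
--
--     if len(counter) != 1:
--         return False
--
--     for key, value in counter.items():
--         if value != 1:
--             return False
--
--     return True
-- ===== SOURCE B (Python) =====
-- def is_descessor(word1, word2):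
--     if len(word2) != len(word1) + 1:
--         return False
--     return all(word1.count(c) <= word2.count(c) for c in set(word1))
-- ===== Notes on version B (the rewrite author's own statement) =====
-- stated objective: simpler
-- what changed: Replaces A's dict-building loop, subtract-with-early-exit loop and single-key/value-1 inspection of the residue with a loop-free check: len(word2) == len(word1)+1 and every character count of word1 is at most its count in word2.
import Mathlib
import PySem

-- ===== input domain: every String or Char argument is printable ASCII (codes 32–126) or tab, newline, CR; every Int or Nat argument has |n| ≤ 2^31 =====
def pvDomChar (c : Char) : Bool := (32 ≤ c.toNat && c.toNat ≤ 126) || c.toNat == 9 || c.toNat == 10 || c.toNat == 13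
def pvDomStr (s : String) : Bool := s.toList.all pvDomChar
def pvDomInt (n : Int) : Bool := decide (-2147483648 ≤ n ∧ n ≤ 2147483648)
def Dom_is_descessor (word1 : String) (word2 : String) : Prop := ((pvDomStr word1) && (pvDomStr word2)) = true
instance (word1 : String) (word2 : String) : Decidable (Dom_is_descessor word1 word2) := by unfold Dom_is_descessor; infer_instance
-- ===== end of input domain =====

-- B replaces A's dict-building loop, subtract-with-early-exit loop and residual inspection by a
-- loop-free length-difference check plus a per-character count comparison (objective: simpler).

-- ===== PORT A =====
-- 'for c in word1: … return False': the early 'return False' is modelled by none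
def isDescLoop : List Char → PySem.Dict Char Int → Option (PySem.Dict Char Int)
  | [], d => some d
  | c :: rest, d =>
    if d.contains c then
      let d2 := d.insert c (d.getD c 0 - 1)
      if d2.getD c 0 == 0 then isDescLoop rest (d2.erase c)
      else isDescLoop rest d2
    else none

def is_descessor (word1 : String) (word2 : String) : Bool :=
  match isDescLoop word1.toList
      (word2.toList.foldl
        (fun d c => if d.contains c then d.insert c (d.getD c 0 + 1) else d.insert c 1)
        PySem.Dict.empty) with
  | none => false
  | some d =>
    if d.size != 1 then false
    else d.items.all (fun kv => kv.2 == 1)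

-- ===== PORT B =====
-- word1.count(c) for a single character c is exactly List.count on the code points;
-- 'all(… for c in set(word1))' is order-independent, so iterating PySem.Set is exact
def is_descessor_alt (word1 : String) (word2 : String) : Bool :=
  if word2.toList.length != word1.toList.length + 1 then false
  else (PySem.Set.ofList word1.toList).all
    (fun c => word1.toList.count c ≤ word2.toList.count c)

-- ===== PRECONDITION & SPEC =====
def Spec_is_descessor (word1 : String) (word2 : String) (out : Bool) : Prop := out = is_descessor_alt word1 word2
instance (word1 : String) (word2 : String) (out : Bool) : Decidable (Spec_is_descessor word1 word2 out) := by unfold Spec_is_descessor; infer_instance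

-- ===== CLAIM (what is proved, stated in full; the proofs are below) =====
def Claim_equal_is_descessor : Prop := ∀ (word1 : String) (word2 : String), Dom_is_descessor word1 word2 → Spec_is_descessor word1 word2 (is_descessor word1 word2)

-- ===== LEMMAS AND PROOFS =====

theorem erase_get? (d : PySem.Dict Char Int) (c x : Char) :
    (d.erase c).get? x = if x = c then none else d.get? x := by
  obtain ⟨l⟩ := d
  induction l with
  | nil => simp [PySem.Dict.erase, PySem.Dict.get?]
  | cons a t ih =>
    simp only [PySem.Dict.erase, PySem.Dict.get?, List.filter_cons] at *
    by_cases hac : a.1 = c <;> by_cases hax : a.1 = x <;>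
      simp_all

theorem filter_map_replace (l : List (Char × Int)) (c : Char) (w : Int) :
    (l.map (fun p => if p.1 == c then (c, w) else p)).filter (fun p => !(p.1 == c))
      = l.filter (fun p => !(p.1 == c)) := by
  induction l with
  | nil => simp
  | cons a t ih =>
    simp only [beq_iff_eq] at ih
    by_cases hac : a.1 = c
    · simp [List.filter_cons, hac, ih]
    · simp [List.filter_cons, hac, ih]

theorem insert_erase_self (d : PySem.Dict Char Int) (c : Char) (w : Int) :
    (d.insert c w).erase c = d.erase c := by
  obtain ⟨l⟩ := d
  simp only [PySem.Dict.insert, PySem.Dict.erase]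
  split
  · exact congrArg PySem.Dict.mk (filter_map_replace l c w)
  · simp [List.filter_append]

theorem erase_values_subset (d : PySem.Dict Char Int) (c : Char) {v : Int}
    (h : v ∈ (d.erase c).values) : v ∈ d.values := by
  obtain ⟨l⟩ := d
  simp only [PySem.Dict.erase, PySem.Dict.values] at *
  obtain ⟨p, hp, rfl⟩ := List.mem_map.1 h
  exact List.mem_map_of_mem (List.mem_of_mem_filter hp)

theorem erase_keys_nodup (d : PySem.Dict Char Int) (c : Char) (h : d.keys.Nodup) :
    (d.erase c).keys.Nodup := by
  obtain ⟨l⟩ := d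
  simp only [PySem.Dict.erase, PySem.Dict.keys] at *
  exact h.sublist (List.Sublist.map _ List.filter_sublist)

theorem sum_filter_key (l : List (Char × Int)) (c : Char) (w : Int)
    (hnd : (l.map Prod.fst).Nodup) (hm : (c, w) ∈ l) :
    ((l.filter (fun p => !(p.1 == c))).map Prod.snd).sum = (l.map Prod.snd).sum - w := by
  induction l with
  | nil => simp at hm
  | cons a t ih =>
    simp only [List.map_cons, List.nodup_cons] at hnd
    rcases List.mem_cons.1 hm with h | h
    · subst h
      have ht : t.filter (fun p => !(p.1 == c)) = t := by
        apply List.filter_eq_self.2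
        intro p hp
        simp only [Bool.not_eq_eq_eq_not, Bool.not_true, beq_eq_false_iff_ne, ne_eq]
        intro hc
        exact hnd.1 (List.mem_map.2 ⟨p, hp, hc⟩)
      simp [List.filter_cons, ht]
    · have hac : ¬ (a.1 = c) := by
        intro hc
        exact hnd.1 (List.mem_map.2 ⟨(c, w), h, hc.symm⟩)
      have hrec := ih hnd.2 h
      simp only [List.filter_cons]
      rw [if_pos (by simp [hac])]
      simp only [List.map_cons, List.sum_cons, hrec]
      ring

theorem sum_replace_key (l : List (Char × Int)) (c : Char) (w v : Int)
    (hnd : (l.map Prod.fst).Nodup) (hm : (c, w) ∈ l) :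
    ((l.map (fun p => if p.1 == c then (c, v) else p)).map Prod.snd).sum
      = (l.map Prod.snd).sum - w + v := by
  induction l with
  | nil => simp at hm
  | cons a t ih =>
    simp only [List.map_cons, List.nodup_cons] at hnd
    rcases List.mem_cons.1 hm with h | h
    · subst h
      have ht : t.map (fun p => if (p.1 == c) = true then (c, v) else p) = t := by
        refine (List.map_congr_left ?_).trans (List.map_id t)
        intro p hp
        have hpc : ¬ ((p.1 == c) = true) := by
          simp only [beq_iff_eq]
          intro hc
          exact hnd.1 (List.mem_map.2 ⟨p, hp, hc⟩)
        simp [hpc]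
      simp only [List.map_cons]
      rw [if_pos (by simp), ht]
      simp only [List.sum_cons]
      ring
    · have hac : ¬ (a.1 = c) := by
        intro hc
        exact hnd.1 (List.mem_map.2 ⟨(c, w), h, hc.symm⟩)
      have hrec := ih hnd.2 h
      simp only [List.map_cons]
      rw [if_neg (by simp [hac])]
      simp only [List.sum_cons, hrec]
      ring

def DInv (d : PySem.Dict Char Int) : Prop :=
  d.keys.Nodup ∧ ∀ v ∈ d.values, 0 < v

theorem sum_values_erase (d : PySem.Dict Char Int) (c : Char) (w : Int)
    (hnd : d.keys.Nodup) (hv : d.get? c = some w) :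
    (d.erase c).values.sum = d.values.sum - w := by
  obtain ⟨l⟩ := d
  have hm := PySem.Dict.mem_items_of_get?_eq_some _ hv
  simp only [PySem.Dict.keys] at hnd
  simpa [PySem.Dict.erase, PySem.Dict.values] using sum_filter_key l c w hnd hm

theorem sum_values_insert_over (d : PySem.Dict Char Int) (c : Char) (w v : Int)
    (hnd : d.keys.Nodup) (hv : d.get? c = some w) :
    (d.insert c v).values.sum = d.values.sum - w + v := by
  obtain ⟨l⟩ := d
  have hm := PySem.Dict.mem_items_of_get?_eq_some _ hv
  have hcont : (PySem.Dict.mk l).contains c = true := by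
    rw [PySem.Dict.contains_eq_isSome_get?, hv]; rfl
  simp only [PySem.Dict.keys] at hnd
  simp only [PySem.Dict.insert, hcont, if_pos]
  simpa [PySem.Dict.values] using sum_replace_key l c w v hnd hm

theorem getD_nonneg_of_inv (d : PySem.Dict Char Int) (hinv : DInv d) (c : Char) :
    0 ≤ d.getD c 0 := by
  rw [PySem.Dict.getD_eq_get?_getD]
  cases hv : d.get? c with
  | none => simp
  | some v =>
    have hm := PySem.Dict.mem_items_of_get?_eq_some _ hv
    exact le_of_lt (hinv.2 v (List.mem_map.2 ⟨(c, v), hm, rfl⟩))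

theorem getD_pos_of_inv (d : PySem.Dict Char Int) (hinv : DInv d) (c : Char)
    (hc : d.contains c = true) : 0 < d.getD c 0 := by
  rw [PySem.Dict.contains_eq_isSome_get?] at hc
  cases hv : d.get? c with
  | none => rw [hv] at hc; simp at hc
  | some v =>
    rw [PySem.Dict.getD_eq_get?_getD, hv]
    have hm := PySem.Dict.mem_items_of_get?_eq_some _ hv
    exact hinv.2 v (List.mem_map.2 ⟨(c, v), hm, rfl⟩)

theorem erase_inv (d : PySem.Dict Char Int) (c : Char) (h : DInv d) :
    DInv (d.erase c) :=
  ⟨erase_keys_nodup d c h.1, fun v hv => h.2 v (erase_values_subset d c hv)⟩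

theorem getD_erase (d : PySem.Dict Char Int) (c x : Char) :
    (d.erase c).getD x 0 = if x = c then 0 else d.getD x 0 := by
  rw [PySem.Dict.getD_eq_get?_getD, erase_get?]
  split <;> simp [PySem.Dict.getD_eq_get?_getD]

theorem count_transfer (d dn : PySem.Dict Char Int) (c : Char) (rest : List Char)
    (hgx : ∀ x, dn.getD x 0 = d.getD x 0 - if x = c then 1 else 0) :
    (∀ x, ((rest.count x : Int) ≤ dn.getD x 0)) ↔
      (∀ x, (((c :: rest).count x : Int) ≤ d.getD x 0)) := by
  apply forall_congr'
  intro x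
  rw [hgx x, List.count_cons]
  by_cases hxc : x = c
  · rw [hxc, if_pos rfl, if_pos (by simp : ((c == c) = true))]
    push_cast; omega
  · rw [if_neg hxc, if_neg (by simp [Ne.symm hxc] : ¬((c == x) = true))]
    push_cast; omega

theorem isDescLoop_spec (l : List Char) : ∀ d : PySem.Dict Char Int, DInv d →
    ((isDescLoop l d = none ↔ ¬ ∀ c, ((l.count c : Int) ≤ d.getD c 0)) ∧
     ∀ d', isDescLoop l d = some d' →
       DInv d' ∧ d'.values.sum = d.values.sum - l.length) := by
  induction l with
  | nil =>
    intro d hinv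
    constructor
    · simp only [isDescLoop]
      constructor
      · intro h; cases h
      · intro h
        exact absurd (fun c => by simpa using getD_nonneg_of_inv d hinv c) h
    · intro d' h
      simp only [isDescLoop, Option.some.injEq] at h
      subst h
      simp [hinv]
  | cons c rest ih =>
    intro d hinv
    by_cases hc : d.contains c = true
    · have hw : 0 < d.getD c 0 := getD_pos_of_inv d hinv c hc
      have hget : d.get? c = some (d.getD c 0) := by
        rw [PySem.Dict.contains_eq_isSome_get?] at hc
        cases hv : d.get? c with
        | none => rw [hv] at hc; simp at hc
        | some v => simp [PySem.Dict.getD_eq_get?_getD, hv]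
      have hstep : isDescLoop (c :: rest) d =
          (if ((d.insert c (d.getD c 0 - 1)).getD c 0 == 0) = true
           then isDescLoop rest ((d.insert c (d.getD c 0 - 1)).erase c)
           else isDescLoop rest (d.insert c (d.getD c 0 - 1))) := by
        simp only [isDescLoop, hc, if_pos]
      have hd2getD : (d.insert c (d.getD c 0 - 1)).getD c 0 = d.getD c 0 - 1 :=
        PySem.Dict.getD_insert_self _ _ _ _
      by_cases hw1 : d.getD c 0 = 1
      · -- the count hits 0 and the key is deleted
        have hcond : ((d.insert c (d.getD c 0 - 1)).getD c 0 == 0) = true := by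
          rw [hd2getD, hw1]
          decide
        rw [hstep, if_pos hcond, insert_erase_self]
        have hinv' : DInv (d.erase c) := erase_inv d c hinv
        have hIH := ih (d.erase c) hinv'
        have hsum : (d.erase c).values.sum = d.values.sum - 1 := by
          rw [sum_values_erase d c _ hinv.1 hget, hw1]
        have hgx : ∀ x, (d.erase c).getD x 0 = d.getD x 0 - if x = c then 1 else 0 := by
          intro x
          rw [getD_erase]
          by_cases hxc : x = c
          · simp [hxc, hw1]
          · simp [hxc]
        have hcnt := count_transfer d (d.erase c) c rest hgx
        constructor
        · rw [hIH.1, not_iff_not]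
          exact hcnt
        · intro d' h
          obtain ⟨hinv2, hsum2⟩ := hIH.2 d' h
          refine ⟨hinv2, ?_⟩
          rw [hsum2, hsum]
          simp only [List.length_cons]
          push_cast; ring
      · -- the count stays positive
        have hwge : 0 < d.getD c 0 - 1 := by omega
        have hcond : ((d.insert c (d.getD c 0 - 1)).getD c 0 == 0) = false := by
          rw [hd2getD]
          simp only [beq_eq_false_iff_ne, ne_eq]
          omega
        rw [hstep, hcond]
        simp only [Bool.false_eq_true, if_false]
        have hinv' : DInv (d.insert c (d.getD c 0 - 1)) := by
          constructor
          · exact PySem.Dict.nodup_keys_insert _ _ _ hinv.1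
          · intro v hv
            rcases PySem.Dict.mem_values_insert _ _ _ _ hv with rfl | hv'
            · exact hwge
            · exact hinv.2 v hv'
        have hIH := ih _ hinv'
        have hsum : (d.insert c (d.getD c 0 - 1)).values.sum = d.values.sum - 1 := by
          rw [sum_values_insert_over d c _ _ hinv.1 hget]; ring
        have hgx : ∀ x, (d.insert c (d.getD c 0 - 1)).getD x 0
            = d.getD x 0 - if x = c then 1 else 0 := by
          intro x
          rw [PySem.Dict.getD_insert]
          by_cases hxc : x = c
          · simp [hxc]
          · simp [hxc]
        have hcnt := count_transfer d _ c rest hgx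
        constructor
        · rw [hIH.1, not_iff_not]
          exact hcnt
        · intro d' h
          obtain ⟨hinv2, hsum2⟩ := hIH.2 d' h
          refine ⟨hinv2, ?_⟩
          rw [hsum2, hsum]
          simp only [List.length_cons]
          push_cast; ring
    · -- 'c in counter' is false: early return False
      have hstep : isDescLoop (c :: rest) d = none := by
        simp only [isDescLoop, hc]
        simp
      have hg : d.getD c 0 = 0 := by
        rw [PySem.Dict.getD_eq_get?_getD]
        rw [PySem.Dict.contains_eq_isSome_get?] at hc
        cases hv : d.get? c with
        | none => simp
        | some v => rw [hv] at hc; simp at hc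
      constructor
      · rw [hstep]
        simp only [true_iff]
        intro h
        have hx := h c
        rw [hg] at hx
        simp only [List.count_cons_self] at hx
        push_cast at hx; omega
      · intro d' h
        rw [hstep] at h; cases h

theorem phase1_eq_counter (l : List Char) :
    l.foldl (fun (d : PySem.Dict Char Int) c =>
        if d.contains c then d.insert c (d.getD c 0 + 1) else d.insert c 1)
      PySem.Dict.empty = PySem.Dict.counter l := by
  have hf : (fun (d : PySem.Dict Char Int) c =>
      if d.contains c then d.insert c (d.getD c 0 + 1) else d.insert c 1)
      = fun (d : PySem.Dict Char Int) c => d.insert c (d.getD c 0 + 1) := by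
    funext d c
    by_cases h : d.contains c = true
    · simp [h]
    · have h' : d.contains c = false := by simpa using h
      rw [if_neg (by simp [h']), PySem.Dict.getD_of_not_contains d 0 h']
      norm_num
  rw [hf]
  exact PySem.Dict.foldl_insert_getD_add_one_eq_counter l

theorem counter_inv (l : List Char) : DInv (PySem.Dict.counter l) := by
  constructor
  · exact PySem.Dict.nodup_keys_counter l
  · intro v hv
    rw [PySem.Dict.values_eq_map_keys _ (PySem.Dict.nodup_keys_counter l) 0] at hv
    obtain ⟨k, hk, rfl⟩ := List.mem_map.1 hv
    rw [PySem.Dict.keys_counter] at hk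
    rw [PySem.Dict.getD_counter]
    have : 0 < l.count k := List.count_pos_iff.2 ((PySem.Set.mem_ofList _ _).1 hk)
    exact_mod_cast this

theorem counter_sum (l : List Char) :
    (PySem.Dict.counter l).values.sum = (l.length : Int) := by
  rw [PySem.Dict.values_eq_map_keys _ (PySem.Dict.nodup_keys_counter l) 0]
  rw [PySem.Dict.keys_counter]
  have h1 : ((PySem.Set.ofList l).map (fun k => ((PySem.Dict.counter l).getD k 0))).sum
      = ((PySem.Set.ofList l).map (fun k => ((l.count k : Int)))).sum := by
    congr 1
    exact List.map_congr_left fun k _ => PySem.Dict.getD_counter l k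
  rw [h1]
  have h2 : ((PySem.Set.ofList l).map (fun k => ((l.count k : Int)))).sum
      = (((PySem.Set.ofList l).map (fun k => l.count k)).sum : Int) := by
    rw [Nat.cast_list_sum, List.map_map]
    rfl
  rw [h2]
  congr 1
  have hnd : (PySem.Set.ofList l).Nodup := PySem.Set.nodup_ofList l
  have hfin : ∀ x, x ∈ (PySem.Set.ofList l).toFinset ↔ x ∈ l.toFinset := by
    intro x
    simp [PySem.Set.mem_ofList]
  calc ((PySem.Set.ofList l).map (fun k => l.count k)).sum
      = ∑ k ∈ (PySem.Set.ofList l).toFinset, l.count k := (List.sum_toFinset _ hnd).symm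
    _ = ∑ k ∈ l.toFinset, l.count k := by
        apply Finset.sum_congr (Finset.ext hfin) (fun _ _ => rfl)
    _ = l.length := List.sum_toFinset_count_eq_length l

theorem sum_ge_length (xs : List Int) (h : ∀ v ∈ xs, 0 < v) :
    (xs.length : Int) ≤ xs.sum := by
  induction xs with
  | nil => simp
  | cons a t ih =>
    have ha := h a (List.mem_cons_self)
    have ht := ih fun v hv => h v (List.mem_cons_of_mem a hv)
    simp only [List.length_cons, List.sum_cons]
    push_cast
    omega

theorem finalCheck_iff (d : PySem.Dict Char Int) (hinv : DInv d) :
    ((if d.size != 1 then false else d.items.all (fun kv => kv.2 == 1)) = true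
      ↔ d.values.sum = 1) := by
  obtain ⟨l⟩ := d
  match l with
  | [] => simp [PySem.Dict.size, PySem.Dict.values]
  | [p] =>
    simp [PySem.Dict.size, PySem.Dict.values, beq_iff_eq]
  | a :: b :: t =>
    have h2 : (2 : Int) ≤ (PySem.Dict.mk (a :: b :: t)).values.sum := by
      have := sum_ge_length (PySem.Dict.mk (a :: b :: t)).values hinv.2
      simp only [PySem.Dict.values, List.map_cons, List.length_cons] at this ⊢
      push_cast at this
      omega
    constructor
    · intro h
      exfalso
      simp [PySem.Dict.size] at h
    · intro h
      omega

theorem alt_iff (w1 w2 : String) : is_descessor_alt w1 w2 = true ↔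
    (w2.toList.length = w1.toList.length + 1 ∧ ∀ c, w1.toList.count c ≤ w2.toList.count c) := by
  unfold is_descessor_alt
  by_cases hlen : w2.toList.length = w1.toList.length + 1
  · rw [show (w2.toList.length != w1.toList.length + 1) = false by
        rw [bne_eq_false_iff_eq]; exact hlen]
    simp only [Bool.false_eq_true, if_false, List.all_eq_true]
    constructor
    · intro h
      refine ⟨hlen, fun c => ?_⟩
      by_cases hm : c ∈ w1.toList
      · simpa using h c ((PySem.Set.mem_ofList _ _).2 hm)
      · have hz : w1.toList.count c = 0 := List.count_eq_zero.2 hm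
        omega
    · intro h c _
      simpa using h.2 c
  · rw [show (w2.toList.length != w1.toList.length + 1) = true by
        rw [bne_iff_ne]; exact hlen, if_pos rfl]
    simp only [Bool.false_eq_true, false_iff]
    intro h
    exact hlen h.1

theorem a_iff (w1 w2 : String) : is_descessor w1 w2 = true ↔
    (w2.toList.length = w1.toList.length + 1 ∧ ∀ c, w1.toList.count c ≤ w2.toList.count c) := by
  unfold is_descessor
  rw [phase1_eq_counter]
  have hinv := counter_inv w2.toList
  have hspec := isDescLoop_spec w1.toList (PySem.Dict.counter w2.toList) hinv
  cases hgo : isDescLoop w1.toList (PySem.Dict.counter w2.toList) with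
  | none =>
    have hne := (hspec.1).1 hgo
    simp only [Bool.false_eq_true, false_iff]
    intro h
    apply hne
    intro c
    rw [PySem.Dict.getD_counter]
    exact_mod_cast h.2 c
  | some d' =>
    have hall : ∀ c, w1.toList.count c ≤ w2.toList.count c := by
      intro c
      have h : ¬ (isDescLoop w1.toList (PySem.Dict.counter w2.toList) = none) := by
        rw [hgo]; simp
      have h2 := (not_iff_not.2 hspec.1).1 h
      rw [not_not] at h2
      have := h2 c
      rw [PySem.Dict.getD_counter] at this
      exact_mod_cast this
    obtain ⟨hinv', hsum⟩ := hspec.2 d' hgo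
    rw [counter_sum] at hsum
    rw [finalCheck_iff d' hinv', hsum]
    constructor
    · intro h
      refine ⟨?_, hall⟩
      omega
    · intro h
      rw [h.1]
      push_cast
      ring

theorem main_eq (word1 word2 : String) :
    is_descessor word1 word2 = is_descessor_alt word1 word2 := by
  rw [Bool.eq_iff_iff, a_iff, alt_iff]

-- ===== VERDICT (by name: the statement is the Claim_ definition above) =====
theorem is_descessor_spec : Claim_equal_is_descessor := by
  intro word1 word2 _hdom
  unfold Spec_is_descessor
  exact main_eq word1 word2
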